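-- pv_equiv track=rewrite | github.com/prashantkthakur/python-projects | course_projects/encryption.py | buildCoder
-- ===== SOURCE A (Python) =====
-- def buildCoder(shift):
--     """
--     Returns a dict that can apply a Caesar cipher to a letter.
--     The cipher is defined by the shift value. Ignores non-letter characters
--     like punctuation, numbers, and spaces.
--
--     shift: 0 <= int < 26
--     returns: dict
--     """
--     ### TODO
--     lower = 'abcdefghijklmnopqrstuvwxyz'
--     upper = lower.upper()
--     caesarDict = {}
--     for letter in lower:
--         for i in lower:
--             caesarDict[i] = lower[(lower.index(i)+shift)%26]
--             caesarDict[i.upper()] = lower[(lower.index(i)+shift)%26].upper()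
--
--
--     return caesarDict
-- ===== SOURCE B (Python) =====
-- def buildCoder(shift):
--     """Caesar-cipher substitution dict: rotate the alphabet once by slicing,
--     then pair originals with images in a single pass (no nested loops, no index/modulo per letter)."""
--     lower = 'abcdefghijklmnopqrstuvwxyz'
--     s = shift % 26
--     shifted = lower[s:] + lower[:s]
--     d = {}
--     for orig, img in zip(lower, shifted):
--         d[orig] = img
--         d[orig.upper()] = img.upper()
--     return d
-- ===== Notes on version B (the rewrite author's own statement) =====
-- stated objective: simpler
-- what changed: Replaces the redundant nested 26x26 loops that recompute each letter's image via lower.index plus modulo with a single rotation of the alphabet by slicing (shift % 26) followed by one zip pass pairing originals to images.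
import Mathlib
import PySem

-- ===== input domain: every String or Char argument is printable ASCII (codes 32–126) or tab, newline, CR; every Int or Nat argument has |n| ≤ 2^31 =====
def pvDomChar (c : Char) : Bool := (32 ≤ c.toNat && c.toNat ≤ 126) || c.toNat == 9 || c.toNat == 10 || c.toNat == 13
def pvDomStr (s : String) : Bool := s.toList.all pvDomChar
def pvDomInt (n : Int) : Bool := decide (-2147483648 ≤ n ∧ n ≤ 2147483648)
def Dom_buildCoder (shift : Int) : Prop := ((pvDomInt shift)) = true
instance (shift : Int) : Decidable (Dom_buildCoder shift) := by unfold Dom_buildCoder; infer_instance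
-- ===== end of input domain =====

-- B replaces A's redundant nested 26x26 loop (index scan + modulo per letter) with one
-- rotation of the alphabet by slicing followed by a single zip pass: simpler.

-- ===== PORT A =====
-- A's nested loops: outer 'for letter in lower' (variable unused), inner rebuilds every entry
-- via lower.index(i) and (idx+shift)%26.  lower[(…)%26] never raises (0 ≤ x % 26 < 26), so the
-- total pyGetD with default 'a' is exact here.
def buildCoder (shift : Int) : List (String × String) :=
  let lower := "abcdefghijklmnopqrstuvwxyz".toList
  let caesarDict : PySem.Dict String String :=
    lower.foldl (fun d _letter =>
      lower.foldl (fun d i =>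
        let c := PySem.List.pyGetD lower
          (PySem.Int.mod (PySem.Chars.find lower [i] + shift) 26) 'a'
        let d := d.insert (String.ofList [i]) (String.ofList [c])
        d.insert (String.ofList [PySem.Chars.upperChar i]) (String.ofList [PySem.Chars.upperChar c])
      ) d) PySem.Dict.empty
  caesarDict.items

-- ===== PORT B =====
-- B: s = shift % 26; shifted = lower[s:] + lower[:s]; one pass over zip(lower, shifted).
def buildCoder_alt (shift : Int) : List (String × String) :=
  let lower := "abcdefghijklmnopqrstuvwxyz".toList
  let s := PySem.Int.mod shift 26
  let shifted := PySem.List.slice lower (some s) none ++ PySem.List.slice lower none (some s)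
  let d : PySem.Dict String String :=
    (lower.zip shifted).foldl (fun d p =>
      (d.insert (String.ofList [p.1]) (String.ofList [p.2])).insert
        (String.ofList [PySem.Chars.upperChar p.1]) (String.ofList [PySem.Chars.upperChar p.2]))
      PySem.Dict.empty
  d.items

-- ===== PRECONDITION & SPEC =====
def Spec_buildCoder (shift : Int) (out : List (String × String)) : Prop := out = buildCoder_alt shift
instance (shift : Int) (out : List (String × String)) : Decidable (Spec_buildCoder shift out) := by unfold Spec_buildCoder; infer_instance

-- ===== CLAIM (what is proved, stated in full; the proofs are below) =====
def Claim_equal_buildCoder : Prop := ∀ (shift : Int), Dom_buildCoder shift → Spec_buildCoder shift (buildCoder shift)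

-- ===== LEMMAS AND PROOFS =====

-- Proof-only abbreviations (definitionally equal to pieces of the ports).
def pvLc : List Char := "abcdefghijklmnopqrstuvwxyz".toList

def pvG (r : Int) (i : Char) : Char :=
  PySem.List.pyGetD pvLc (PySem.Int.mod (PySem.Chars.find pvLc [i] + r) 26) 'a'

def pvStep (r : Int) (d : PySem.Dict String String) (i : Char) : PySem.Dict String String :=
  (d.insert (String.ofList [i]) (String.ofList [pvG r i])).insert
    (String.ofList [PySem.Chars.upperChar i]) (String.ofList [PySem.Chars.upperChar (pvG r i)])

def pvStepB (d : PySem.Dict String String) (p : Char × Char) : PySem.Dict String String :=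
  (d.insert (String.ofList [p.1]) (String.ofList [p.2])).insert
    (String.ofList [PySem.Chars.upperChar p.1]) (String.ofList [PySem.Chars.upperChar p.2])

def pvPairs (xs : List (Char × Char)) : List (String × String) :=
  xs.flatMap fun p =>
    [(String.ofList [p.1], String.ofList [p.2]),
     (String.ofList [PySem.Chars.upperChar p.1], String.ofList [PySem.Chars.upperChar p.2])]

def pvFold2 (d : PySem.Dict String String) (ps : List (String × String)) : PySem.Dict String String :=
  ps.foldl (fun d p => d.insert p.1 p.2) d

-- The ports, re-expressed through the abbreviations (definitional).
lemma buildCoder_eq (shift : Int) :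
    buildCoder shift
      = (List.foldl (fun d _letter => List.foldl (pvStep shift) d pvLc) PySem.Dict.empty pvLc).items := rfl

lemma buildCoder_alt_eq (shift : Int) :
    buildCoder_alt shift
      = (List.foldl pvStepB PySem.Dict.empty
          (pvLc.zip (PySem.List.slice pvLc (some (PySem.Int.mod shift 26)) none
            ++ PySem.List.slice pvLc none (some (PySem.Int.mod shift 26))))).items := rfl

-- A depends on shift only through shift % 26.
lemma pvStep_mod (shift : Int) : pvStep shift = pvStep (PySem.Int.mod shift 26) := by
  have h : ∀ x : Int, PySem.Int.mod (x + shift) 26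
      = PySem.Int.mod (x + PySem.Int.mod shift 26) 26 := by
    intro x
    simp only [PySem.Int.mod_eq_emod_of_pos (by norm_num : (0:Int) < 26)]
    omega
  funext d i
  simp only [pvStep, pvG, h]

lemma buildCoder_mod (shift : Int) :
    buildCoder shift = buildCoder (PySem.Int.mod shift 26) := by
  rw [buildCoder_eq, buildCoder_eq, pvStep_mod]

-- A's fold of two inserts per letter is one single-insert fold over its flattened pair list.
lemma stepA_fold (r : Int) (xs : List Char) (d : PySem.Dict String String) :
    List.foldl (pvStep r) d xs = pvFold2 d (pvPairs (xs.map (fun i => (i, pvG r i)))) := by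
  induction xs generalizing d with
  | nil => rfl
  | cons i xs ih =>
    simp only [List.foldl_cons, List.map_cons, pvPairs, List.flatMap_cons, pvFold2,
      List.foldl_append, pvStep] at ih ⊢
    exact ih _

-- B's fold likewise.
lemma stepB_fold (xs : List (Char × Char)) (d : PySem.Dict String String) :
    List.foldl pvStepB d xs = pvFold2 d (pvPairs xs) := by
  induction xs generalizing d with
  | nil => rfl
  | cons p xs ih =>
    simp only [List.foldl_cons, pvPairs, List.flatMap_cons, pvFold2,
      List.foldl_append, pvStepB] at ih ⊢
    exact ih _

-- Inserting a key already present, with the value it already has, changes nothing.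
lemma insert_self_of_present (d : PySem.Dict String String) (k v : String)
    (hc : d.contains k = true) (hv : ∀ q ∈ d.items, q.1 = k → q.2 = v) :
    d.insert k v = d := by
  obtain ⟨l⟩ := d
  simp only [PySem.Dict.insert, hc, if_true]
  congr 1
  have h : ∀ p ∈ l, (if (p.1 == k) = true then (k, v) else p) = p := by
    intro p hp
    by_cases hpk : p.1 = k
    · have h2 := hv p hp hpk
      rw [hpk, beq_self_eq_true, if_pos rfl, ← hpk, ← h2]
    · simp [hpk]
  rw [List.map_congr_left h]
  simp

-- pvFold2 over keys all fresh w.r.t. the accumulator appends the pairs verbatim.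
lemma pvFold2_acc (ps acc : List (String × String))
    (hnd : ((acc ++ ps).map Prod.fst).Nodup) :
    pvFold2 (PySem.Dict.mk acc) ps = PySem.Dict.mk (acc ++ ps) := by
  induction ps generalizing acc with
  | nil => simp [pvFold2]
  | cons p ps ih =>
    have hnotin : p.1 ∉ acc.map Prod.fst := by
      have h' := hnd
      simp only [List.map_append, List.map_cons, List.nodup_append] at h'
      intro hmem
      exact h'.2.2 p.1 hmem p.1 (by simp) rfl
    have hc : (PySem.Dict.mk acc).contains p.1 = false := by
      by_contra hcon
      rw [Bool.not_eq_false] at hcon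
      simp only [PySem.Dict.contains, List.any_eq_true] at hcon
      obtain ⟨q, hq, hbq⟩ := hcon
      exact hnotin ((eq_of_beq hbq) ▸ List.mem_map_of_mem hq)
    have hins : (PySem.Dict.mk acc).insert p.1 p.2 = PySem.Dict.mk (acc ++ [p]) := by
      simp [PySem.Dict.insert, hc]
    rw [List.append_cons] at hnd
    have h2 := ih (acc ++ [p]) hnd
    simp only [pvFold2, List.foldl_cons] at h2 ⊢
    rw [hins, h2]
    simp

lemma pvFold2_empty (ps : List (String × String)) (hnd : (ps.map Prod.fst).Nodup) :
    pvFold2 PySem.Dict.empty ps = PySem.Dict.mk ps := by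
  have h := pvFold2_acc ps [] (by simpa using hnd)
  simpa using h

-- A fold of inserts that are each individually the identity is the identity.
lemma pvFold2_id (D : PySem.Dict String String) (ps : List (String × String))
    (h : ∀ p ∈ ps, D.insert p.1 p.2 = D) : pvFold2 D ps = D := by
  induction ps with
  | nil => rfl
  | cons p ps ih =>
    simp only [pvFold2, List.foldl_cons] at ih ⊢
    rw [h p (List.mem_cons_self ..)]
    exact ih (fun q hq => h q (List.mem_cons_of_mem _ hq))

-- Re-running the pass over a dict that already holds exactly those pairs changes nothing.
lemma pvFold2_fix (ps : List (String × String)) (hnd : (ps.map Prod.fst).Nodup) :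
    pvFold2 (PySem.Dict.mk ps) ps = PySem.Dict.mk ps := by
  apply pvFold2_id
  intro p hp
  apply insert_self_of_present
  · simp only [PySem.Dict.contains, List.any_eq_true]
    exact ⟨p, hp, by simp⟩
  · intro q hq hq1
    have := List.inj_on_of_nodup_map hnd hq hp hq1
    rw [this]

-- The keys of a pass do not depend on the shift and are pairwise distinct.
lemma pvPairs_keys (xs : List (Char × Char)) :
    (pvPairs xs).map Prod.fst
      = xs.flatMap fun p => [String.ofList [p.1], String.ofList [PySem.Chars.upperChar p.1]] := by
  simp [pvPairs, List.map_flatMap]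

lemma pvKeys_nodup (r : Int) :
    ((pvPairs (pvLc.map (fun i => (i, pvG r i)))).map Prod.fst).Nodup := by
  rw [pvPairs_keys, List.flatMap_map]
  exact (by decide :
    (pvLc.flatMap fun i => [String.ofList [i], String.ofList [PySem.Chars.upperChar i]]).Nodup)

-- Folding a constant self-map over a nonempty list collapses to one application.
lemma foldl_const_collapse {α β : Type} (xs : List α) (f : β → α → β) (h : β → β) (e : β)
    (hstep : ∀ d y, f d y = h d) (hid : h (h e) = h e) (hne : xs ≠ []) :
    xs.foldl f e = h e := by
  have aux : ∀ (ys : List α), ys.foldl f (h e) = h e := by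
    intro ys
    induction ys with
    | nil => rfl
    | cons y ys ih => rw [List.foldl_cons, hstep, hid, ih]
  cases xs with
  | nil => exact absurd rfl hne
  | cons x xs => rw [List.foldl_cons, hstep]; exact aux xs

-- The rotated table agrees pointwise with A's index+modulo image (for 0 ≤ r < 26).
lemma zip_eq_map (r : Int) (h0 : 0 ≤ r) (h1 : r < 26) :
    pvLc.zip (PySem.List.slice pvLc (some r) none ++ PySem.List.slice pvLc none (some r))
      = pvLc.map (fun i => (i, pvG r i)) := by
  interval_cases r <;> decide

-- ===== VERDICT (by name: the statement is the Claim_ definition above) =====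
theorem buildCoder_spec : Claim_equal_buildCoder := by
  intro shift _
  unfold Spec_buildCoder
  rw [buildCoder_mod shift, buildCoder_eq, buildCoder_alt_eq shift]
  have h0 : 0 ≤ PySem.Int.mod shift 26 := PySem.Int.mod_nonneg _ (by norm_num)
  have h1 : PySem.Int.mod shift 26 < 26 := PySem.Int.mod_lt _ (by norm_num)
  set r := PySem.Int.mod shift 26 with hr
  clear_value r
  rw [zip_eq_map r h0 h1, stepB_fold]
  have hnd := pvKeys_nodup r
  have hid : List.foldl (pvStep r) (List.foldl (pvStep r) PySem.Dict.empty pvLc) pvLc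
      = List.foldl (pvStep r) PySem.Dict.empty pvLc := by
    simp only [stepA_fold]
    rw [pvFold2_empty _ hnd, pvFold2_fix _ hnd]
  rw [foldl_const_collapse pvLc (fun d _letter => List.foldl (pvStep r) d pvLc)
      (fun d => List.foldl (pvStep r) d pvLc) PySem.Dict.empty (fun _ _ => rfl) hid (by decide),
    stepA_fold]
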